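-- pv_equiv track=rewrite | github.com/goodarzilab/dms_utils | dms_utils/utils/nudreem_utils.py | filter_3_distance_between_mutations
-- ===== SOURCE A (Python) =====
-- def filter_3_distance_between_mutations(row, filters_names_loc):
--     passed = True
--     bit_string = row['Bit_vector']
--     latest_mutbit_index = -1000
--     for i in range(len(bit_string)):
--         if bit_string[i] == '1':
--             if i - latest_mutbit_index < 4:
--                 passed = False
--             latest_mutbit_index = i
--     return passed
-- ===== SOURCE B (Python) =====
-- def filter_3_distance_between_mutations(row, filters_names_loc):
--     bits = row['Bit_vector']
--     return all(bits[i:i+4].count('1') <= 1 for i in range(len(bits)))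
-- ===== Notes on version B (the rewrite author's own statement) =====
-- stated objective: alternative
-- what changed: Replaces A's left-to-right scan with a carried last-mutation-index sentinel by a sliding-window formulation: every length-4 window of the bit string must contain at most one '1' (checked via slice+count per window).
import Mathlib
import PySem

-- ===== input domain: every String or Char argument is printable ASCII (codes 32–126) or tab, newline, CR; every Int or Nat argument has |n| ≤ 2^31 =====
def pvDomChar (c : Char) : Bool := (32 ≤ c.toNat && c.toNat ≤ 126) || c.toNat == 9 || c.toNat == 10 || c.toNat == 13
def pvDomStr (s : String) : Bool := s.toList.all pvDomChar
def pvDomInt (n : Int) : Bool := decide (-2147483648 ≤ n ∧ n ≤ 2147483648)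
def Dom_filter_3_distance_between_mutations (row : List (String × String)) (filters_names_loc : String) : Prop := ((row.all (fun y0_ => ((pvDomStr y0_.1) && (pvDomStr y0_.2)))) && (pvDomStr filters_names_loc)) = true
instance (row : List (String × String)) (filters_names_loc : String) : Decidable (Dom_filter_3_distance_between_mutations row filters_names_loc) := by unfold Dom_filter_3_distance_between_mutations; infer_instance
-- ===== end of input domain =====

-- B replaces A's sentinel-carrying scan by a sliding-window check (every length-4 window
-- holds at most one '1'); alternative formulation, same asymptotic cost.

-- ===== PORT A =====
def filter_3_distance_between_mutations (row : List (String × String)) (filters_names_loc : String) : Bool :=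
  match (PySem.Dict.mk row).get? "Bit_vector" with
  | none => true   -- Python raises KeyError here; excluded by Pre_
  | some bit_string =>
    let cs := bit_string.toList
    ((PySem.List.pyRange 0 (PySem.Str.len bit_string) 1).foldl
      (fun (st : Bool × Int) i =>
        if PySem.List.pyGetD cs i ' ' = '1' then
          ((if i - st.2 < 4 then false else st.1), i)
        else st)
      (true, -1000)).1

-- ===== PORT B =====
def filter_3_distance_between_mutations_alt (row : List (String × String)) (filters_names_loc : String) : Bool :=
  match (PySem.Dict.mk row).get? "Bit_vector" with
  | none => true   -- Python raises KeyError here; excluded by Pre_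
  | some bits =>
    let cs := bits.toList
    (PySem.List.pyRange 0 cs.length 1).all
      (fun i => decide (PySem.Chars.count (PySem.List.slice cs (some i) (some (i + 4))) ['1'] ≤ 1))

-- ===== PRECONDITION & SPEC =====
-- Pre_: the row must contain the 'Bit_vector' key; otherwise both Pythons raise KeyError.
def Pre_filter_3_distance_between_mutations (row : List (String × String)) (filters_names_loc : String) : Prop :=
  ((PySem.Dict.mk row).get? "Bit_vector").isSome = true
instance (row : List (String × String)) (filters_names_loc : String) : Decidable (Pre_filter_3_distance_between_mutations row filters_names_loc) := by unfold Pre_filter_3_distance_between_mutations; infer_instance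
def pvWitness_filter_3_distance_between_mutations : (List (String × String)) × String := ([("Bit_vector", "10001001")], "f")
def Spec_filter_3_distance_between_mutations (row : List (String × String)) (filters_names_loc : String) (out : Bool) : Prop := out = filter_3_distance_between_mutations_alt row filters_names_loc
instance (row : List (String × String)) (filters_names_loc : String) (out : Bool) : Decidable (Spec_filter_3_distance_between_mutations row filters_names_loc out) := by unfold Spec_filter_3_distance_between_mutations; infer_instance

-- ===== CLAIM (what is proved, stated in full; the proofs are below) =====
def Claim_equal_filter_3_distance_between_mutations : Prop := ∀ (row : List (String × String)) (filters_names_loc : String), Dom_filter_3_distance_between_mutations row filters_names_loc → Pre_filter_3_distance_between_mutations row filters_names_loc → Spec_filter_3_distance_between_mutations row filters_names_loc (filter_3_distance_between_mutations row filters_names_loc)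

-- ===== LEMMAS AND PROOFS =====

-- PySem.Chars.count with the singleton needle ['1'] is List.count '1'
lemma pvCountGo_one (fuel : Nat) (l : List Char) (acc : Nat) (h : l.length ≤ fuel) :
    PySem.Chars.count.go ['1'] fuel l acc = acc + l.count '1' := by
  induction fuel generalizing l acc with
  | zero =>
      interval_cases hl : l.length
      · simp [List.length_eq_zero_iff.1 hl, PySem.Chars.count.go]
  | succ fuel ih =>
      cases l with
      | nil => simp [PySem.Chars.count.go]
      | cons c t =>
          by_cases hc : c = '1'
          · subst hc
            have hp : List.isPrefixOf ['1'] ('1' :: t) = true := by simp [List.isPrefixOf]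
            simp only [PySem.Chars.count.go, hp, if_pos]
            rw [ih _ _ (by simpa using Nat.le_of_succ_le_succ (by simpa using h))]
            simp
            omega
          · have hc' : ('1' : Char) ≠ c := fun h => hc h.symm
            have hp : List.isPrefixOf ['1'] (c :: t) = false := by
              simp [List.isPrefixOf, hc']
            simp only [PySem.Chars.count.go, hp]
            rw [if_neg (by simp)]
            rw [ih _ _ (by simpa using Nat.le_of_succ_le_succ (by simpa using h))]
            simp [hc', hc]

lemma pvCount_one (l : List Char) : PySem.Chars.count l ['1'] = l.count '1' := by
  simp [PySem.Chars.count, pvCountGo_one l.length l 0 le_rfl]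

-- the windows check, as structural recursion on the string
def pvW : List Char → Bool
  | [] => true
  | c :: rest => (decide (((c :: rest).take 4).count '1' ≤ 1)) && pvW rest

lemma pvW_head (xs : List Char) (h : pvW xs = true) : (xs.take 4).count '1' ≤ 1 := by
  cases xs with
  | nil => simp
  | cons c rest =>
      simp only [pvW, Bool.and_eq_true, decide_eq_true_eq] at h
      exact h.1

-- B's all-over-range-of-windows equals pvW
lemma pvB_eq_W (cs : List Char) :
    ((List.range cs.length).all
      (fun k => decide (((cs.drop k).take 4).count '1' ≤ 1))) = pvW cs := by
  induction cs with
  | nil => simp [pvW]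
  | cons c rest ih =>
      rw [show (c :: rest).length = rest.length + 1 from rfl, List.range_succ_eq_map]
      simp only [List.all_cons, List.all_map, Function.comp_def, List.drop_zero,
        Nat.succ_eq_add_one, List.drop_succ_cons]
      simp only [pvW]
      congr 1

-- A's loop step over enumerated characters
def pvStepA (st : Bool × Int) (p : Int × Char) : Bool × Int :=
  if p.2 = '1' then ((if p.1 - st.2 < 4 then false else st.1), p.1) else st

-- the fold invariant: result = (flag so far) && windows-check of the rest
-- && no '1' within reach of the last mutation seen before this suffix
lemma pvInv (cs : List Char) (s last : Int) (b : Bool) (h : last < s) :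
    ((PySem.List.enumerate cs s).foldl pvStepA (b, last)).1
      = (b && pvW cs && decide ((cs.take ((4 - (s - last)).toNat)).count '1' = 0)) := by
  induction cs generalizing s last b with
  | nil => simp [pvW]
  | cons c rest ih =>
      rw [PySem.List.enumerate_cons, List.foldl_cons]
      by_cases hc : c = '1'
      · subst hc
        rw [show pvStepA (b, last) (s, '1')
              = ((if s - last < 4 then false else b), s) by simp [pvStepA]]
        rw [ih _ _ _ (by omega)]
        have h3 : (4 - (s + 1 - s)).toNat = 3 := by omega
        rw [h3]
        simp only [pvW]
        have h4 : ((('1' : Char) :: rest).take 4).count '1' = (rest.take 3).count '1' + 1 := by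
          simp [List.count_cons]
        by_cases hd : s - last < 4
        · -- too close: both sides are false
          rw [if_pos hd]
          obtain ⟨t, ht⟩ : ∃ t : Nat, (4 - (s - last)).toNat = t + 1 :=
            ⟨(4 - (s - last)).toNat - 1, by omega⟩
          rw [ht, List.take_succ_cons]
          simp [List.count_cons]
        · rw [if_neg hd]
          have ht : (4 - (s - last)).toNat = 0 := by omega
          rw [ht, h4]
          have hdc : decide ((rest.take 3).count '1' + 1 ≤ 1)
              = decide ((rest.take 3).count '1' = 0) := by
            rcases Nat.eq_zero_or_pos ((rest.take 3).count '1') with hz | hz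
            · simp [hz]
            · simp only [decide_eq_decide]; omega
          rw [hdc]
          simp [Bool.and_comm, Bool.and_left_comm, Bool.and_assoc]
      · rw [show pvStepA (b, last) (s, c) = (b, last) by simp [pvStepA, hc]]
        rw [ih _ _ _ (by omega)]
        simp only [pvW]
        have h4 : ((c :: rest).take 4).count '1' = (rest.take 3).count '1' := by
          simp [hc]
        have hW : (decide (((c :: rest).take 4).count '1' ≤ 1) && pvW rest) = pvW rest := by
          cases hw : pvW rest with
          | false => simp
          | true =>
              have hmono : (rest.take 3).count '1' ≤ (rest.take 4).count '1' := by
                have hsub : List.Sublist (rest.take 3) (rest.take 4) := by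
                  rw [show (3 : Nat) = min 3 4 from rfl, ← List.take_take]
                  exact List.take_sublist 3 (rest.take 4)
                exact hsub.count_le '1'
              have hhead := pvW_head rest hw
              rw [h4]
              simp only [Bool.and_true, decide_eq_true_eq]
              omega
        rw [hW]
        by_cases hd : s - last < 4
        · obtain ⟨t, ht1, ht2⟩ : ∃ t : Nat, (4 - (s - last)).toNat = t + 1
              ∧ (4 - (s + 1 - last)).toNat = t :=
            ⟨(4 - (s + 1 - last)).toNat, by omega, rfl⟩
          rw [ht1, ht2, List.take_succ_cons]
          have h5 : (c :: rest.take t).count '1' = (rest.take t).count '1' := by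
            simp [hc]
          rw [h5]
        · have ht1 : (4 - (s - last)).toNat = 0 := by omega
          have ht2 : (4 - (s + 1 - last)).toNat = 0 := by omega
          rw [ht1, ht2]
          simp

theorem filter_3_distance_between_mutations_spec : Claim_equal_filter_3_distance_between_mutations := by
  intro row fnl _ hpre
  unfold Spec_filter_3_distance_between_mutations
  unfold filter_3_distance_between_mutations filter_3_distance_between_mutations_alt
  unfold Pre_filter_3_distance_between_mutations at hpre
  cases hget : (PySem.Dict.mk row).get? "Bit_vector" with
  | none => simp [hget] at hpre
  | some bs =>
    simp only
    set cs := bs.toList with hcs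
    -- A's fold over the index range = fold over enumerate, then the invariant
    have hA : (PySem.List.pyRange 0 (PySem.Str.len bs) 1).foldl
        (fun (st : Bool × Int) i =>
          if PySem.List.pyGetD cs i ' ' = '1' then ((if i - st.2 < 4 then false else st.1), i) else st)
        (true, -1000)
        = (PySem.List.enumerate cs 0).foldl pvStepA (true, -1000) := by
      rw [PySem.List.enumerate_eq_map_pyRange (d := ' '), List.foldl_map]
      simp [PySem.Str.len_eq, PySem.List.len_eq, hcs, pvStepA]
    rw [hA, pvInv cs 0 (-1000) true (by omega)]
    have ht : ((4 : Int) - (0 - -1000)).toNat = 0 := by omega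
    rw [ht]
    -- B's side: slices become drop/take windows, then pvB_eq_W
    have hB : (PySem.List.pyRange 0 (cs.length : Int) 1).all
        (fun i => decide (PySem.Chars.count (PySem.List.slice cs (some i) (some (i + 4))) ['1'] ≤ 1))
        = (List.range cs.length).all
            (fun k => decide (((cs.drop k).take 4).count '1' ≤ 1)) := by
      rw [PySem.List.pyRange_one]
      simp only [sub_zero, Int.toNat_natCast, List.all_map, Function.comp_def]
      congr 1
      funext k
      rw [show (0 : Int) + (k : Int) = (k : Int) by ring]
      rw [show ((k : Int) + 4) = ((k : Int) + ((4 : Nat) : Int)) by norm_num]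
      rw [PySem.List.slice_natCast_add, pvCount_one]
    rw [hB, pvB_eq_W]
    simp

-- ===== VERDICT note: the theorem above is the claim by name =====
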